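-- pv_equiv track=rewrite | github.com/aleko2144/Hard-Truck-1-2-Blender-plugins | src/addons/b3d_tools/b3d/common.py | unmask_template
-- ===== SOURCE A (Python) =====
-- def unmask_template(templ):
--     offset = 0
--     unmasks = []
--     t_a = int(templ[0])
--     t_r = int(templ[1])
--     t_g = int(templ[2])
--     t_b = int(templ[3])
--     total_bytes = t_r + t_g + t_b + t_a
--     for i in range(4):
--         cur_int = int(templ[i])
--         lzeros = offset
--         bits = cur_int
--         rzeros = total_bytes - lzeros - bits
--         unmasks.append([lzeros, bits, rzeros])
--         offset += cur_int
--     return unmasks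
-- ===== SOURCE B (Python) =====
-- def unmask_template(templ):
--     vals = [int(templ[i]) for i in range(4)]
--     total = sum(vals)
--     offsets = [sum(vals[:i]) for i in range(4)]
--     return [[offsets[i], vals[i], total - offsets[i] - vals[i]] for i in range(4)]
-- ===== Notes on version B (the rewrite author's own statement) =====
-- stated objective: alternative
-- what changed: Replaces the threaded running-offset loop with a separately built prefix-sum offset table consumed by a single comprehension.
import Mathlib
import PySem

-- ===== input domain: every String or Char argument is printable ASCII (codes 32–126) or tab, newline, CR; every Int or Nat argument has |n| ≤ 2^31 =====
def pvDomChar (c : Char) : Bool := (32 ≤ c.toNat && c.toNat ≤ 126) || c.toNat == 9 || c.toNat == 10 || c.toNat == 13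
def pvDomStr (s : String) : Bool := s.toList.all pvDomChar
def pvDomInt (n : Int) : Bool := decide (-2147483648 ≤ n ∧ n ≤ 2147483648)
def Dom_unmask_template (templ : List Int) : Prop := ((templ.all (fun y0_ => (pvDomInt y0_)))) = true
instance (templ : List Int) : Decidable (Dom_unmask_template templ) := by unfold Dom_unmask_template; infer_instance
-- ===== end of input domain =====

-- B builds a prefix-sum offset table in a separate pass instead of threading a running offset (alternative decomposition, same cost).

-- ===== PORT A =====
def unmask_template (templ : List Int) : List (List Int) :=
  let t_a := PySem.List.pyGetD templ 0 0
  let t_r := PySem.List.pyGetD templ 1 0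
  let t_g := PySem.List.pyGetD templ 2 0
  let t_b := PySem.List.pyGetD templ 3 0
  let total_bytes := t_r + t_g + t_b + t_a
  ((PySem.List.pyRange 0 4 1).foldl (fun (st : Int × List (List Int)) i =>
      let cur_int := PySem.List.pyGetD templ i 0
      let lzeros := st.1
      let bits := cur_int
      let rzeros := total_bytes - lzeros - bits
      (st.1 + cur_int, st.2 ++ [[lzeros, bits, rzeros]])) ((0 : Int), ([] : List (List Int)))).2

-- ===== PORT B =====
def unmask_template_alt (templ : List Int) : List (List Int) :=
  let vals := (PySem.List.pyRange 0 4 1).map (fun i => PySem.List.pyGetD templ i 0)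
  let total := vals.sum
  let offsets := (PySem.List.pyRange 0 4 1).map (fun i => (vals.take i.toNat).sum)
  (PySem.List.pyRange 0 4 1).map (fun i =>
    [PySem.List.pyGetD offsets i 0, PySem.List.pyGetD vals i 0,
     total - PySem.List.pyGetD offsets i 0 - PySem.List.pyGetD vals i 0])

-- ===== PRECONDITION & SPEC =====
-- A indexes templ[0..3]; it raises IndexError on lists shorter than 4, so those are excluded.
def Pre_unmask_template (templ : List Int) : Prop := 4 ≤ templ.length
instance (templ : List Int) : Decidable (Pre_unmask_template templ) := by unfold Pre_unmask_template; infer_instance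
def pvWitness_unmask_template : List Int := [8, 8, 8, 8]

def Spec_unmask_template (templ : List Int) (out : List (List Int)) : Prop := out = unmask_template_alt templ
instance (templ : List Int) (out : List (List Int)) : Decidable (Spec_unmask_template templ out) := by unfold Spec_unmask_template; infer_instance

-- ===== CLAIM (what is proved, stated in full; the proofs are below) =====
def Claim_equal_unmask_template : Prop := ∀ (templ : List Int), Dom_unmask_template templ → Pre_unmask_template templ → Spec_unmask_template templ (unmask_template templ)

-- ===== LEMMAS AND PROOFS =====

-- ===== VERDICT (by name: the statement is the Claim_ definition above) =====
theorem unmask_template_spec : Claim_equal_unmask_template := by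
  intro templ _ hpre
  unfold Spec_unmask_template
  unfold Pre_unmask_template at hpre
  match templ, hpre with
  | a :: b :: c :: d :: t, _ =>
    have hr : PySem.List.pyRange 0 4 1 = [0, 1, 2, 3] := by decide
    simp [unmask_template, unmask_template_alt, hr, PySem.List.pyGetD_ofNat', List.getD]
    and_intros <;> ring
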